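-- pv_equiv track=rewrite | github.com/annberjin/CS50-2024 | week6/sentimental-readability/readability.py | count
-- ===== SOURCE A (Python) =====
-- def count(text):
--     words = 1
--     letters = 0
--     sentences = 0
--
--     for i in text:
--         if i == " ":
--             words += 1
--
--         elif i.isalpha():
--             letters += 1
--
--         elif i in [".", "!", "?"]:
--             sentences += 1
--
--     return words, letters, sentences
-- ===== SOURCE B (Python) =====
-- def count(text):
--     words = text.count(" ") + 1
--     letters = sum(1 for c in text if c.isalpha())
--     sentences = text.count(".") + text.count("!") + text.count("?")
--     return words, letters, sentences
-- ===== Notes on version B (the rewrite author's own statement) =====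
-- stated objective: simpler
-- what changed: Replaces the single fused elif-chain loop over characters with three independent passes: str.count for words and sentence terminators and a generator sum for letters.
import Mathlib
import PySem

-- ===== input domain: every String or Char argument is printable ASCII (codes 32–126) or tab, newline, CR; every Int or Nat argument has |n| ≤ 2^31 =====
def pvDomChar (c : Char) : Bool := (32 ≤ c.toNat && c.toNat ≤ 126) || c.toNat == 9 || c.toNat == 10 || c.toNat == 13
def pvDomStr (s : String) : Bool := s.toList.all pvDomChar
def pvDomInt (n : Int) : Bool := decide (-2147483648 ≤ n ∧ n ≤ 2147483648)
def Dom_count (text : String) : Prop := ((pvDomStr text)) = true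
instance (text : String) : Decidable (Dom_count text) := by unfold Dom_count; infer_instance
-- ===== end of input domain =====

-- B replaces A's single fused elif-chain loop with three independent passes (str.count twice, a filtered sum for letters); objective: simpler.

-- ===== PORT A =====
-- one fused loop, elif chain in the same order as the Python
def count (text : String) : Int × Int × Int :=
  text.toList.foldl
    (fun acc i =>
      let (words, letters, sentences) := acc
      if i == ' ' then (words + 1, letters, sentences)
      else if PySem.Chars.isalpha i then (words, letters + 1, sentences)
      else if ['.', '!', '?'].contains i then (words, letters, sentences + 1)
      else (words, letters, sentences))
    (1, 0, 0)

-- ===== PORT B =====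
def count_alt (text : String) : Int × Int × Int :=
  ((PySem.Str.count text " " : Int) + 1,
   ((text.toList.filter (fun c => PySem.Chars.isalpha c)).length : Int),
   ((PySem.Str.count text "." + PySem.Str.count text "!" + PySem.Str.count text "?" : Nat) : Int))

-- ===== PRECONDITION & SPEC =====
def Spec_count (text : String) (out : Int × Int × Int) : Prop := out = count_alt text
instance (text : String) (out : Int × Int × Int) : Decidable (Spec_count text out) := by unfold Spec_count; infer_instance

-- ===== CLAIM (what is proved, stated in full; the proofs are below) =====
def Claim_equal_count : Prop := ∀ (text : String), Dom_count text → Spec_count text (count text)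

-- ===== LEMMAS AND PROOFS =====

-- Chars.count with a single-character needle is List.count
theorem chars_count_go_single (c : Char) :
    ∀ (fuel : Nat) (l : List Char) (acc : Nat), l.length ≤ fuel →
      PySem.Chars.count.go [c] fuel l acc = acc + l.count c := by
  intro fuel
  induction fuel with
  | zero =>
    intro l acc h
    have : l = [] := List.length_eq_zero_iff.mp (Nat.le_zero.mp h)
    subst this
    simp [PySem.Chars.count.go]
  | succ n ih =>
    intro l acc h
    cases l with
    | nil => simp [PySem.Chars.count.go]
    | cons hd t =>
      rw [PySem.Chars.count.go]
      by_cases hc : hd = c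
      · subst hc
        have hp : List.isPrefixOf [hd] (hd :: t) = true := by
          simp [List.isPrefixOf]
        simp only [hp, if_pos, List.length_cons, List.length_nil, List.drop_succ_cons,
          List.drop_zero]
        rw [ih t (acc + 1) (by simpa using Nat.succ_le_succ_iff.mp h)]
        simp [List.count_cons]
        omega
      · have hp : List.isPrefixOf [c] (hd :: t) = false := by
          simp [List.isPrefixOf, hc]
          exact fun h' => hc h'.symm
        simp only [hp]
        rw [if_neg (by simp [hp])]
        rw [ih t acc (by simpa using Nat.succ_le_succ_iff.mp h)]
        simp [List.count_cons, hc]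

theorem chars_count_single (l : List Char) (c : Char) :
    PySem.Chars.count l [c] = l.count c := by
  rw [PySem.Chars.count]
  simp only [List.isEmpty_cons, Bool.false_eq_true, if_false]
  rw [chars_count_go_single c l.length l 0 (le_refl _)]
  simp

-- terminator characters are not alpha, space is not alpha (ground facts)
theorem isalpha_space : PySem.Chars.isalpha ' ' = false := by decide

-- the fused loop of A computes the three independent counts of B
theorem count_foldl_eq (l : List Char) :
    ∀ (w le s : Int),
      l.foldl
        (fun acc i =>
          let (words, letters, sentences) := acc
          if i == ' ' then (words + 1, letters, sentences)
          else if PySem.Chars.isalpha i then (words, letters + 1, sentences)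
          else if ['.', '!', '?'].contains i then (words, letters, sentences + 1)
          else (words, letters, sentences))
        (w, le, s)
      = (w + l.count ' ',
         le + ((l.filter (fun c => PySem.Chars.isalpha c)).length : Int),
         s + ((l.count '.' + l.count '!' + l.count '?' : Nat) : Int)) := by
  induction l with
  | nil => intro w le s; simp
  | cons hd t ih =>
    intro w le s
    simp only [List.foldl_cons]
    by_cases h1 : hd = ' '
    · subst h1
      simp only [beq_self_eq_true, if_pos]
      rw [ih]
      simp only [List.count_cons, List.filter_cons, isalpha_space, Bool.false_eq_true,
        if_false, Prod.mk.injEq]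
      norm_num
      omega
    · have hb : (hd == ' ') = false := beq_eq_false_iff_ne.mpr h1
      simp only [hb, Bool.false_eq_true, if_false]
      by_cases h2 : PySem.Chars.isalpha hd = true
      · simp only [h2, if_pos]
        rw [ih]
        have hd1 : hd ≠ '.' := by intro h; rw [h] at h2; exact absurd h2 (by decide)
        have hd2 : hd ≠ '!' := by intro h; rw [h] at h2; exact absurd h2 (by decide)
        have hd3 : hd ≠ '?' := by intro h; rw [h] at h2; exact absurd h2 (by decide)
        simp [List.count_cons, List.filter_cons, h1, h2, hd1, hd2, hd3]
        omega
      · have h2' : PySem.Chars.isalpha hd = false := by simpa using h2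
        simp only [h2', Bool.false_eq_true, if_false]
        by_cases h3 : ['.', '!', '?'].contains hd = true
        · simp only [h3, if_pos]
          rw [ih]
          have : hd = '.' ∨ hd = '!' ∨ hd = '?' := by
            simpa [List.contains, List.elem_cons, or_comm, or_assoc] using
              (List.contains_iff_mem.mp h3)
          rcases this with h | h | h <;>
            · subst h
              simp [List.count_cons, List.filter_cons, h1, h2']
              omega
        · have h3' : (['.', '!', '?'].contains hd) = false := by simpa using h3
          simp only [h3', Bool.false_eq_true, if_false]
          rw [ih]
          have hd1 : hd ≠ '.' := by intro h; subst h; simp at h3'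
          have hd2 : hd ≠ '!' := by intro h; subst h; simp at h3'
          have hd3 : hd ≠ '?' := by intro h; subst h; simp at h3'
          simp [List.count_cons, List.filter_cons, h1, h2', hd1, hd2, hd3]

-- ===== VERDICT (by name: the statement is the Claim_ definition above) =====
theorem count_spec : Claim_equal_count := by
  intro text _
  unfold Spec_count count count_alt
  rw [count_foldl_eq]
  simp only [PySem.Str.count_eq]
  have hs : ("." : String).toList = ['.'] := rfl
  have hb : ("!" : String).toList = ['!'] := rfl
  have hq : ("?" : String).toList = ['?'] := rfl
  have hsp : (" " : String).toList = [' '] := rfl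
  rw [hs, hb, hq, hsp, chars_count_single, chars_count_single, chars_count_single,
    chars_count_single]
  simp [add_comm]
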